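-- pv_equiv track=rewrite | github.com/bobzhu-11/FundamentalsOfProgramming | Aufgaben/02/Aufgabe2.py | aufgabe_c
-- ===== SOURCE A (Python) =====
-- def aufgabe_c(rezep: list[tuple[str, list[tuple[int, str]]]],zutaten:set[str]) -> list[tuple[int,str]]:
--     result: list[tuple[int,str]] = []
--     for z in zutaten:
--         result.append((0, z))
--
--     for rezept in rezep:
--         fingerfood_zutaten = rezept[1]
--         for menge, zutat in fingerfood_zutaten:
--             for i, (m, z) in enumerate(result):
--                 if z == zutat:
--                     result[i] = (m + menge, z)
--     return result
-- ===== SOURCE B (Python) =====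
-- def aufgabe_c(rezep: list[tuple[str, list[tuple[int, str]]]], zutaten: set[str]) -> list[tuple[int, str]]:
--     # For each requested ingredient, sum its quantities directly over all recipes
--     # (no shared result table maintained at all; each output is computed independently).
--     return [
--         (sum(menge for _, fz in rezep for menge, zutat in fz if zutat == z), z)
--         for z in zutaten
--     ]
-- ===== Notes on version B (the rewrite author's own statement) =====
-- stated objective: simpler
-- what changed: A maintains a mutable result table that every ingredient entry updates in place; B maintains no table and instead computes each requested ingredient's total as an independent generator sum over all recipe entries (loop interchange).
import Mathlib
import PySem

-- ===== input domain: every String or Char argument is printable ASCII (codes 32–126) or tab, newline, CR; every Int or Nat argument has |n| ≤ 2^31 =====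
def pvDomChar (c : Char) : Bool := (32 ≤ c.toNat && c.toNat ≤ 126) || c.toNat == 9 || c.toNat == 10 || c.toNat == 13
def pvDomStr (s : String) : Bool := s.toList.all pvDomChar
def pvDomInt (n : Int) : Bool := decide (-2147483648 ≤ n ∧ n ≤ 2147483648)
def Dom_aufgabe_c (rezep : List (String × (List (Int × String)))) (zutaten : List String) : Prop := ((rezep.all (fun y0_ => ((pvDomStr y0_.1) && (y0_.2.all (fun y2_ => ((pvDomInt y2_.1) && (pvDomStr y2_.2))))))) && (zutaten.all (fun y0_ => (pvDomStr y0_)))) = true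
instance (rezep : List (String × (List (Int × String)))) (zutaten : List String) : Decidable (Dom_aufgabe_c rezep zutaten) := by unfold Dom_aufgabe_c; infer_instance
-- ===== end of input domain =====

-- B drops A's in-place result table entirely: each requested ingredient's total is an
-- independent sum over all recipe entries (loop interchange), simpler and equally fast.


-- ===== PORT A =====
-- inner 'for i, (m, z) in enumerate(result): if z == zutat: result[i] = (m + menge, z)'
-- (index-assignment applied to every matching position = pointwise map over the list)
def aufgabeCUpdate (result : List (Int × String)) (menge : Int) (zutat : String) :
    List (Int × String) :=
  result.map (fun p => if p.2 == zutat then (p.1 + menge, p.2) else p)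

def aufgabe_c (rezep : List (String × (List (Int × String)))) (zutaten : List String) : List (Int × String) :=
  -- seed loop: result = []; for z in zutaten: result.append((0, z))
  let result := zutaten.foldl (fun r z => r ++ [((0 : Int), z)]) []
  -- main nested loops over rezep and each recipe's ingredient list
  rezep.foldl (fun result rezept =>
    rezept.2.foldl (fun result mz => aufgabeCUpdate result mz.1 mz.2) result) result

-- ===== PORT B =====
-- sum(menge for _, fz in rezep for menge, zutat in fz if zutat == z)
def aufgabeCSumFor (rezep : List (String × (List (Int × String)))) (z : String) : Int :=
  rezep.foldl (fun acc rezept =>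
    rezept.2.foldl (fun acc mz => if mz.2 == z then acc + mz.1 else acc) acc) 0

def aufgabe_c_alt (rezep : List (String × (List (Int × String)))) (zutaten : List String) : List (Int × String) :=
  zutaten.map (fun z => (aufgabeCSumFor rezep z, z))

-- ===== PRECONDITION & SPEC =====
def Spec_aufgabe_c (rezep : List (String × (List (Int × String)))) (zutaten : List String) (out : List (Int × String)) : Prop := out = aufgabe_c_alt rezep zutaten
instance (rezep : List (String × (List (Int × String)))) (zutaten : List String) (out : List (Int × String)) : Decidable (Spec_aufgabe_c rezep zutaten out) := by unfold Spec_aufgabe_c; infer_instance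

-- ===== CLAIM (what is proved, stated in full; the proofs are below) =====
def Claim_equal_aufgabe_c : Prop := ∀ (rezep : List (String × (List (Int × String)))) (zutaten : List String), Dom_aufgabe_c rezep zutaten → Spec_aufgabe_c rezep zutaten (aufgabe_c rezep zutaten)

-- ===== LEMMAS AND PROOFS =====

-- total quantity of ingredient z in a flat list of (menge, zutat) pairs
def totOf (ps : List (Int × String)) (z : String) : Int :=
  match ps with
  | [] => 0
  | mz :: rest => (if z == mz.2 then mz.1 else 0) + totOf rest z

-- A's seed loop builds zutaten.map (fun z => (0, z))
theorem seed_eq (zutaten : List String) :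
    zutaten.foldl (fun r z => r ++ [((0 : Int), z)]) [] =
      zutaten.map (fun z => ((0 : Int), z)) := by
  have h : ∀ (l : List String) (acc : List (Int × String)),
      l.foldl (fun r z => r ++ [((0 : Int), z)]) acc =
        acc ++ l.map (fun z => ((0 : Int), z)) := by
    intro l
    induction l with
    | nil => simp [List.foldl]
    | cons x xs ih => intro acc; simp [List.foldl, ih]
  simpa using h zutaten []

-- nested foldl over rezep = flat foldl over the concatenation of ingredient lists
theorem foldl_nested_eq_flat {σ : Type} (f : σ → (Int × String) → σ)
    (rezep : List (String × (List (Int × String)))) (init : σ) :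
    rezep.foldl (fun s rezept => rezept.2.foldl f s) init =
      (rezep.flatMap (·.2)).foldl f init := by
  induction rezep generalizing init with
  | nil => rfl
  | cons r rs ih => simp [List.foldl, List.flatMap_cons, List.foldl_append, ih]

-- A's flat update loop, started on a table of the shape map (g z, z), ends on the
-- shape map (g z + totOf ps z, z)
theorem updates_eq (ps : List (Int × String)) (zutaten : List String) (g : String → Int) :
    ps.foldl (fun result mz => aufgabeCUpdate result mz.1 mz.2)
      (zutaten.map (fun z => (g z, z))) =
      zutaten.map (fun z => (g z + totOf ps z, z)) := by
  induction ps generalizing g with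
  | nil => simp [totOf]
  | cons mz rest ih =>
    have hstep : aufgabeCUpdate (zutaten.map (fun z => (g z, z))) mz.1 mz.2 =
        zutaten.map (fun z => ((fun z => g z + if z == mz.2 then mz.1 else 0) z, z)) := by
      simp only [aufgabeCUpdate, List.map_map]
      apply List.map_congr_left
      intro z _
      by_cases h : z = mz.2 <;> simp [h]
    simp only [List.foldl_cons, hstep, ih, totOf]
    apply List.map_congr_left
    intro z _
    by_cases h : z = mz.2 <;> simp [h] <;> ring

-- B's flat sum loop computes totOf plus the initial accumulator
theorem sum_flat_eq (ps : List (Int × String)) (z : String) (acc : Int) :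
    ps.foldl (fun acc mz => if mz.2 == z then acc + mz.1 else acc) acc =
      acc + totOf ps z := by
  induction ps generalizing acc with
  | nil => simp [totOf]
  | cons mz rest ih =>
    simp only [List.foldl_cons, ih, totOf]
    by_cases h : mz.2 = z
    · subst h; simp; ring
    · have h1 : (mz.2 == z) = false := by simp [h]
      have h2 : (z == mz.2) = false := by simp [Ne.symm h]
      simp [h1, h2]

-- ===== VERDICT (by name: the statement is the Claim_ definition above) =====
theorem aufgabe_c_spec : Claim_equal_aufgabe_c := by
  intro rezep zutaten _
  unfold Spec_aufgabe_c aufgabe_c aufgabe_c_alt aufgabeCSumFor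
  rw [seed_eq, foldl_nested_eq_flat, updates_eq]
  apply List.map_congr_left
  intro z _
  rw [foldl_nested_eq_flat, sum_flat_eq]
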